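-- pv_equiv track=rewrite | github.com/XCWQW1/iirosebot | iirosebot/utools/replay_to_json.py | replay_to_json
-- ===== SOURCE A (Python) =====
-- def replay_to_json(text):
--     try:
--         text = text.split(" (hr_) ")
--         reply_list = []
--         num = 0
--         for i in text:
--             data = i.split(" (_hr) ")
--
--             if len(data) == 1:
--                 reply_list[len(reply_list) - 1]['reply'] = data[0]
--                 break
--
--             user_data = data[1].split("_")
--             if num == 0:
--                 reply_list.append({"message": data[0], "user_name": user_data[0], "timestamp": user_data[1]})
--             else:
--                 reply_list[len(reply_list) - 1]['reply'] = data[0]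
--                 reply_list.append({"message": data[0], "user_name": user_data[0], "timestamp": user_data[1]})
--             num += 1
--         return reply_list
--     except:
--         return []
-- ===== SOURCE B (Python) =====
-- def replay_to_json(text):
--     # Pass 1: parse segments into (message, user_name, timestamp) tuples,
--     # remembering a trailing reply-only segment; validate explicitly instead
--     # of relying on exceptions.
--     entries = []
--     trailing = None
--     for seg in text.split(" (hr_) "):
--         parts = seg.split(" (_hr) ")
--         if len(parts) == 1:
--             trailing = parts[0]
--             break
--         ud = parts[1].split("_")
--         if len(ud) < 2:
--             return []
--         entries.append((parts[0], ud[0], ud[1]))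
--     if trailing is not None and not entries:
--         return []
--     # Pass 2: link replies pairwise; the last entry gets the trailing reply.
--     out = [{"message": c[0], "user_name": c[1], "timestamp": c[2], "reply": n[0]}
--            for c, n in zip(entries, entries[1:])]
--     if entries:
--         d = {"message": entries[-1][0],
--              "user_name": entries[-1][1],
--              "timestamp": entries[-1][2]}
--         if trailing is not None:
--             d["reply"] = trailing
--         out.append(d)
--     return out
-- ===== Notes on version B (the rewrite author's own statement) =====
-- stated objective: alternative
-- what changed: A's single exception-driven loop that mutates the previous dict and counts iterations with num is replaced by a two-pass decomposition: pass 1 parses segments into (message, user_name, timestamp) tuples with explicit validation (no try/except), pass 2 links each entry's reply to the next entry's message via zip and attaches the recorded trailing reply to the last entry.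
import Mathlib
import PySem

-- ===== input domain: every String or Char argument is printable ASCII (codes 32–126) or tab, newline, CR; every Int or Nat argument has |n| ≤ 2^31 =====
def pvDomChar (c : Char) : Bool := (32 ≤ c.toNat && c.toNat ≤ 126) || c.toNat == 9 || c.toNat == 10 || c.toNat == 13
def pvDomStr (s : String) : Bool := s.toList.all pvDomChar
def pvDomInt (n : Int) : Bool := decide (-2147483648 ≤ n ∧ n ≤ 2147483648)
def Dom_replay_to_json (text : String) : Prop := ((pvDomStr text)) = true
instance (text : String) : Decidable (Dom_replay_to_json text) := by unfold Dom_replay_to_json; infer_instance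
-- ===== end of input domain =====

-- B replaces A's single mutating loop (exception-driven, with a `num` counter) by a
-- clean two-pass decomposition: parse into tuples with explicit validation, then link
-- replies pairwise with zip; objective: simpler (return value only; same behaviour).

-- s.split(sep) for a nonempty literal sep (shared primitive of both ports)
def pvSplit (s sep : String) : List String :=
  (PySem.Chars.splitOn s.toList sep.toList).map String.ofList

-- ===== PORT A =====

-- reply_list[len(reply_list)-1]['reply'] = r  ('reply' is always a fresh key here,
-- so the dict assignment appends; none = IndexError on the empty list)
def pvSetLastReply (acc : List (List (String × String))) (r : String) :
    Option (List (List (String × String))) :=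
  match acc.getLast? with
  | none => none
  | some d => some (acc.dropLast ++ [d ++ [("reply", r)]])

-- A's for-loop; none = an exception was raised (caught by the outer except).
-- data[0] is data.headD "" and data[1] is pyGetD data 1 "" (split never returns
-- fewer than 2 pieces when its length is not 1); user_data[1] can genuinely be
-- missing (IndexError), hence the pyGet? match.
def pvLoopA : List String → List (List (String × String)) → Nat →
    Option (List (List (String × String)))
  | [], acc, _ => some acc
  | i :: rest, acc, num =>
    let data := pvSplit i " (_hr) "
    if data.length = 1 then
      pvSetLastReply acc (data.headD "")      -- then break: the loop returns this list
    else
      let user_data := pvSplit (PySem.List.pyGetD data 1 "") "_"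
      match PySem.List.pyGet? user_data (1 : Int) with
      | none => none
      | some ts =>
        let entry := [("message", data.headD ""), ("user_name", user_data.headD ""),
                      ("timestamp", ts)]
        if num = 0 then
          pvLoopA rest (acc ++ [entry]) (num + 1)
        else
          match pvSetLastReply acc (data.headD "") with
          | none => none
          | some acc' => pvLoopA rest (acc' ++ [entry]) (num + 1)

def replay_to_json (text : String) : List (List (String × String)) :=
  match pvLoopA (pvSplit text " (hr_) ") [] 0 with
  | some l => l
  | none => []                                 -- except: return []

-- ===== PORT B =====

-- pass 1 of Source B: build (message, user_name, timestamp) tuples; trailing reply-only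
-- segment breaks the loop; none = Source B's explicit 'return []' on a bad user field
def pvParseB : List String → List (String × String × String) →
    Option (List (String × String × String) × Option String)
  | [], entries => some (entries, none)
  | seg :: rest, entries =>
    let parts := pvSplit seg " (_hr) "
    if parts.length = 1 then
      some (entries, some (parts.headD ""))
    else
      let ud := pvSplit (PySem.List.pyGetD parts 1 "") "_"
      if ud.length < 2 then none
      else pvParseB rest
        (entries ++ [(parts.headD "", ud.headD "", PySem.List.pyGetD ud 1 "")])

-- pass 2 of Source B: the zip(entries, entries[1:]) comprehension (entries[1:] = tail)
def pvLinkPairs (entries : List (String × String × String)) :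
    List (List (String × String)) :=
  (entries.zip entries.tail).map (fun cn =>
    [("message", cn.1.1), ("user_name", cn.1.2.1), ("timestamp", cn.1.2.2),
     ("reply", cn.2.1)])

def replay_to_json_alt (text : String) : List (List (String × String)) :=
  match pvParseB (pvSplit text " (hr_) ") [] with
  | none => []
  | some (entries, trailing) =>
    if trailing.isSome && entries.isEmpty then []
    else
      let out := pvLinkPairs entries
      match entries.getLast? with               -- 'if entries:' with entries[-1]
      | none => out
      | some last =>
        let d := [("message", last.1), ("user_name", last.2.1),
                  ("timestamp", last.2.2)]
        out ++ [match trailing with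
                | some t => d ++ [("reply", t)]
                | none => d]

-- ===== PRECONDITION & SPEC =====
def Spec_replay_to_json (text : String) (out : List (List (String × String))) : Prop := out = replay_to_json_alt text
instance (text : String) (out : List (List (String × String))) : Decidable (Spec_replay_to_json text out) := by unfold Spec_replay_to_json; infer_instance

-- ===== CLAIM (what is proved, stated in full; the proofs are below) =====
def Claim_equal_replay_to_json : Prop := ∀ (text : String), Dom_replay_to_json text → Spec_replay_to_json text (replay_to_json text)

-- ===== LEMMAS AND PROOFS =====

-- proof-side: the 3-field dict of an entry
def pvMk (e : String × String × String) : List (String × String) :=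
  [("message", e.1), ("user_name", e.2.1), ("timestamp", e.2.2)]

-- proof-side: pass 1 without the accumulator
def pvParseP : List String → Option (List (String × String × String) × Option String)
  | [] => some ([], none)
  | seg :: rest =>
    let parts := pvSplit seg " (_hr) "
    if parts.length = 1 then
      some ([], some (parts.headD ""))
    else
      let ud := pvSplit (PySem.List.pyGetD parts 1 "") "_"
      if ud.length < 2 then none
      else (pvParseP rest).map (fun p =>
        ((parts.headD "", ud.headD "", PySem.List.pyGetD ud 1 "") :: p.1, p.2))

-- proof-side: the fully linked list for a run of entries with an optional trailing reply
def pvChain : List (String × String × String) → Option String → List (List (String × String))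
  | [], _ => []
  | [e], tr => [pvMk e ++ (match tr with | some t => [("reply", t)] | none => [])]
  | e :: e' :: t, tr => (pvMk e ++ [("reply", e'.1)]) :: pvChain (e' :: t) tr

-- unfolding equations, stated by hand (rfl) to avoid heavy automation on the ports
lemma pvLoopA_nil (acc : List (List (String × String))) (num : Nat) :
    pvLoopA [] acc num = some acc := rfl

lemma pvLoopA_cons (i : String) (rest : List String)
    (acc : List (List (String × String))) (num : Nat) :
    pvLoopA (i :: rest) acc num =
      (if (pvSplit i " (_hr) ").length = 1 then
         pvSetLastReply acc ((pvSplit i " (_hr) ").headD "")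
       else
         match PySem.List.pyGet? (pvSplit (PySem.List.pyGetD (pvSplit i " (_hr) ") 1 "") "_") (1 : Int) with
         | none => none
         | some ts =>
           if num = 0 then
             pvLoopA rest (acc ++ [[("message", (pvSplit i " (_hr) ").headD ""),
               ("user_name", (pvSplit (PySem.List.pyGetD (pvSplit i " (_hr) ") 1 "") "_").headD ""),
               ("timestamp", ts)]]) (num + 1)
           else
             match pvSetLastReply acc ((pvSplit i " (_hr) ").headD "") with
             | none => none
             | some acc' => pvLoopA rest (acc' ++ [[("message", (pvSplit i " (_hr) ").headD ""),
                 ("user_name", (pvSplit (PySem.List.pyGetD (pvSplit i " (_hr) ") 1 "") "_").headD ""),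
                 ("timestamp", ts)]]) (num + 1)) := rfl

lemma pvParseP_nil : pvParseP [] = some ([], none) := rfl

lemma pvParseP_cons (seg : String) (rest : List String) :
    pvParseP (seg :: rest) =
      (if (pvSplit seg " (_hr) ").length = 1 then
         some ([], some ((pvSplit seg " (_hr) ").headD ""))
       else
         if (pvSplit (PySem.List.pyGetD (pvSplit seg " (_hr) ") 1 "") "_").length < 2 then none
         else (pvParseP rest).map (fun p =>
           (((pvSplit seg " (_hr) ").headD "",
             (pvSplit (PySem.List.pyGetD (pvSplit seg " (_hr) ") 1 "") "_").headD "",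
             PySem.List.pyGetD (pvSplit (PySem.List.pyGetD (pvSplit seg " (_hr) ") 1 "") "_") 1 "") :: p.1,
            p.2))) := rfl

lemma pvParseB_nil (entries : List (String × String × String)) :
    pvParseB [] entries = some (entries, none) := rfl

lemma pvParseB_cons (seg : String) (rest : List String)
    (entries : List (String × String × String)) :
    pvParseB (seg :: rest) entries =
      (if (pvSplit seg " (_hr) ").length = 1 then
         some (entries, some ((pvSplit seg " (_hr) ").headD ""))
       else
         if (pvSplit (PySem.List.pyGetD (pvSplit seg " (_hr) ") 1 "") "_").length < 2 then none
         else pvParseB rest (entries ++ [((pvSplit seg " (_hr) ").headD "",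
           (pvSplit (PySem.List.pyGetD (pvSplit seg " (_hr) ") 1 "") "_").headD "",
           PySem.List.pyGetD (pvSplit (PySem.List.pyGetD (pvSplit seg " (_hr) ") 1 "") "_") 1 "")])) := rfl

-- index evaluations used by the proofs
lemma pvGet1_none (xs : List String) (h : xs.length < 2) :
    PySem.List.pyGet? xs (1 : Int) = none := by
  match xs with
  | [] => simp [PySem.List.pyGet?, PySem.List.pyIdx?]
  | [a] => simp [PySem.List.pyGet?, PySem.List.pyIdx?]
  | a :: b :: t => simp at h

lemma pvGet1_two (a b : String) (t : List String) :
    PySem.List.pyGet? (a :: b :: t) (1 : Int) = some b := by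
  simp [PySem.List.pyGet?, PySem.List.pyIdx?]

lemma pvGetD1_two (a b : String) (t : List String) :
    PySem.List.pyGetD (a :: b :: t) 1 "" = b := by
  simp [PySem.List.pyGetD, PySem.List.pyGet?, PySem.List.pyIdx?]

lemma pvParseB_eq (segs : List String) (entries : List (String × String × String)) :
    pvParseB segs entries = (pvParseP segs).map (fun p => (entries ++ p.1, p.2)) := by
  induction segs generalizing entries with
  | nil => rw [pvParseB_nil, pvParseP_nil]; simp
  | cons seg rest ih =>
    rw [pvParseB_cons, pvParseP_cons]
    by_cases h1 : (pvSplit seg " (_hr) ").length = 1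
    · simp only [if_pos h1]; simp
    · simp only [if_neg h1]
      by_cases h2 : (pvSplit (PySem.List.pyGetD (pvSplit seg " (_hr) ") 1 "") "_").length < 2
      · simp only [if_pos h2]; simp
      · simp only [if_neg h2]
        rw [ih]
        cases hp : pvParseP rest with
        | none => simp
        | some p => simp

lemma pvLoopA_eq (segs : List String) :
    ∀ (acc : List (List (String × String))) (last : String × String × String) (n : Nat),
    pvLoopA segs (acc ++ [pvMk last]) (n + 1) =
      match pvParseP segs with
      | none => none
      | some (es, tr) => some (acc ++ pvChain (last :: es) tr) := by
  induction segs with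
  | nil =>
    intro acc last n
    rw [pvLoopA_nil, pvParseP_nil]
    simp [pvChain]
  | cons seg rest ih =>
    intro acc last n
    rw [pvLoopA_cons, pvParseP_cons]
    by_cases h1 : (pvSplit seg " (_hr) ").length = 1
    · -- trailing segment: set last's reply and break
      simp only [if_pos h1]
      simp [pvSetLastReply, pvChain]
    · simp only [if_neg h1]
      by_cases h2 : (pvSplit (PySem.List.pyGetD (pvSplit seg " (_hr) ") 1 "") "_").length < 2
      · -- bad user field: both raise
        simp only [if_pos h2]
        rw [pvGet1_none _ h2]
      · -- a full entry: link the previous one and recurse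
        simp only [if_neg h2]
        cases hud : pvSplit (PySem.List.pyGetD (pvSplit seg " (_hr) ") 1 "") "_" with
        | nil => rw [hud] at h2; simp at h2
        | cons a t =>
          cases t with
          | nil => rw [hud] at h2; simp at h2
          | cons b t2 =>
            rw [pvGet1_two, pvGetD1_two]
            dsimp only
            simp only [List.headD_cons]
            rw [if_neg (show ¬ (n + 1 = 0) by omega)]
            have hset : pvSetLastReply (acc ++ [pvMk last]) ((pvSplit seg " (_hr) ").headD "") =
                some (acc ++ [pvMk last ++ [("reply", (pvSplit seg " (_hr) ").headD "")]]) := by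
              simp [pvSetLastReply]
            rw [hset]
            dsimp only
            have heq : acc ++ [pvMk last ++ [("reply", (pvSplit seg " (_hr) ").headD "")]] ++
                [[("message", (pvSplit seg " (_hr) ").headD ""), ("user_name", a), ("timestamp", b)]] =
                (acc ++ [pvMk last ++ [("reply", (pvSplit seg " (_hr) ").headD "")]]) ++
                [pvMk ((pvSplit seg " (_hr) ").headD "", a, b)] := by
              simp [pvMk]
            rw [heq, ih]
            cases hp : pvParseP rest with
            | none => simp
            | some p =>
              cases p with
              | mk es tr =>
                simp only [Option.map_some, Option.some.injEq]
                show acc ++ [pvMk last ++ [("reply", (pvSplit seg " (_hr) ").headD "")]] ++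
                    pvChain (((pvSplit seg " (_hr) ").headD "", a, b) :: es) tr =
                  acc ++ pvChain (last :: ((pvSplit seg " (_hr) ").headD "", a, b) :: es) tr
                simp only [pvChain, pvMk, List.append_assoc]
                simp

lemma pvLink_eq (es : List (String × String × String)) (tr : Option String) :
    (pvLinkPairs es ++ (match es.getLast? with
      | none => []
      | some last => [match tr with
          | some t => [("message", last.1), ("user_name", last.2.1), ("timestamp", last.2.2)] ++ [("reply", t)]
          | none => [("message", last.1), ("user_name", last.2.1), ("timestamp", last.2.2)]])) =
    pvChain es tr := by
  induction es with
  | nil => simp [pvLinkPairs, pvChain]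
  | cons e rest ih =>
    cases rest with
    | nil =>
      cases tr <;> simp [pvLinkPairs, pvChain, pvMk]
    | cons e' t =>
      have hl : pvLinkPairs (e :: e' :: t) =
          (pvMk e ++ [("reply", e'.1)]) :: pvLinkPairs (e' :: t) := by
        simp [pvLinkPairs, pvMk]
      rw [List.getLast?_cons_cons, hl, pvChain, ← ih]
      simp

-- ===== VERDICT (by name: the statement is the Claim_ definition above) =====
theorem replay_to_json_spec : Claim_equal_replay_to_json := by
  intro text _
  show replay_to_json text = replay_to_json_alt text
  unfold replay_to_json replay_to_json_alt
  rw [pvParseB_eq]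
  generalize pvSplit text " (hr_) " = segs
  cases segs with
  | nil => rw [pvLoopA_nil, pvParseP_nil]; simp [pvLinkPairs]
  | cons seg rest =>
    rw [pvLoopA_cons, pvParseP_cons]
    by_cases h1 : (pvSplit seg " (_hr) ").length = 1
    · -- first segment is reply-only: A raises IndexError, B returns []
      simp only [if_pos h1]
      simp [pvSetLastReply]
    · simp only [if_neg h1]
      by_cases h2 : (pvSplit (PySem.List.pyGetD (pvSplit seg " (_hr) ") 1 "") "_").length < 2
      · -- bad user field in the first segment: A raises, Source B returns []
        simp only [if_pos h2]
        rw [pvGet1_none _ h2]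
        simp
      · simp only [if_neg h2]
        cases hud : pvSplit (PySem.List.pyGetD (pvSplit seg " (_hr) ") 1 "") "_" with
        | nil => rw [hud] at h2; simp at h2
        | cons a t =>
          cases t with
          | nil => rw [hud] at h2; simp at h2
          | cons b t2 =>
            rw [pvGet1_two, pvGetD1_two]
            dsimp only
            simp only [List.headD_cons]
            simp only [if_true]
            have h0 : [[("message", (pvSplit seg " (_hr) ").headD ""), ("user_name", a), ("timestamp", b)]] =
                [pvMk ((pvSplit seg " (_hr) ").headD "", a, b)] := rfl
            rw [h0, pvLoopA_eq rest [] ((pvSplit seg " (_hr) ").headD "", a, b) 0]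
            cases hp : pvParseP rest with
            | none => simp
            | some p =>
              cases p with
              | mk es tr =>
                simp only [Option.map_some, List.nil_append]
                cases hL : (((pvSplit seg " (_hr) ").headD "", a, b) :: es).getLast? with
                | none => simp at hL
                | some last =>
                  have hlink := pvLink_eq (((pvSplit seg " (_hr) ").headD "", a, b) :: es) tr
                  rw [hL] at hlink
                  rw [if_neg (by simp), ← hlink]
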